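-- pv_equiv track=rewrite | github.com/flameworks/JaneStreetPuzzles | temp.py | largest_three
-- ===== SOURCE A (Python) =====
-- def largest_three(L):
--     K = 3 # Adjustment for top K, question asks for 3
--     A = [-1]*K # List with len K, the only list needed
--     for iteration in range(K-1,-1,-1):
--         for maxDX in range(K):
--             if maxDX not in A: break
--         for i in range(len(L)):
--             if L[i] > L[maxDX] and i not in A:
--                 maxDX = i
--         A[iteration] = maxDX
--     for i in range(K):
--         A[i] = L[A[i]]
--     return tuple(A)
-- ===== SOURCE B (Python) =====
-- def largest_three(L):
--     s = sorted(L)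
--     return (s[-3], s[-2], s[-1])
-- ===== Notes on version B (the rewrite author's own statement) =====
-- stated objective: simpler
-- what changed: B sorts a copy of the list once and reads the last three positions, replacing A's three exclusion-based max scans over index lists.
import Mathlib
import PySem

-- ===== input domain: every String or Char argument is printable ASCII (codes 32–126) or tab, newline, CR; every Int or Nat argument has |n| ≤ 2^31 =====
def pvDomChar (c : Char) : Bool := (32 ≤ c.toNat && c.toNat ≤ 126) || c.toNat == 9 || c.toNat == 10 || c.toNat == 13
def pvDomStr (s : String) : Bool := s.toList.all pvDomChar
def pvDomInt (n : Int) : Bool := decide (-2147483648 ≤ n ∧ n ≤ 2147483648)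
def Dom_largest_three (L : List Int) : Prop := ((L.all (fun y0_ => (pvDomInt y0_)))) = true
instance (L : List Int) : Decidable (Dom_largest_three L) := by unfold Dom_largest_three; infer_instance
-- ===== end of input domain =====

-- B sorts the list once and reads the last three positions instead of A's three exclusion-based max scans (simpler).

-- ===== PORT A =====
-- 'for maxDX in range(K): if maxDX not in A: break' (maxDX is left at 2 when none is free)
def pvFirstFree (A : List Int) : Int :=
  if ¬ A.contains 0 then 0 else if ¬ A.contains 1 then 1 else 2

-- 'for i in range(len(L)): if L[i] > L[maxDX] and i not in A: maxDX = i'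
def pvScan (L : List Int) (A : List Int) (m0 : Int) : Int :=
  (List.range L.length).foldl
    (fun (m : Int) (i : Nat) =>
      if PySem.List.pyGetD L (i : Int) 0 > PySem.List.pyGetD L m 0 ∧ ¬ A.contains (i : Int) then
        (i : Int)
      else m)
    m0

def largest_three (L : List Int) : Int × Int × Int :=
  let A0 : List Int := [-1, -1, -1]
  let A1 := (PySem.List.pyRange 2 (-1) (-1)).foldl
    (fun A iteration => A.set iteration.toNat (pvScan L A (pvFirstFree A))) A0
  let A2 := (List.range 3).foldl
    (fun A i => A.set i (PySem.List.pyGetD L (PySem.List.pyGetD A (i : Int) 0) 0)) A1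
  match A2 with
  | [a, b, c] => (a, b, c)
  | _ => (0, 0, 0)

-- ===== PORT B =====
def largest_three_alt (L : List Int) : Int × Int × Int :=
  let s := PySem.List.sorted L (fun x => x) false
  (PySem.List.pyGetD s (-3) 0, PySem.List.pyGetD s (-2) 0, PySem.List.pyGetD s (-1) 0)

-- ===== PRECONDITION & SPEC =====
-- Python A (and B) raise IndexError on lists with fewer than three elements; those are excluded.
def Pre_largest_three (L : List Int) : Prop := 3 ≤ L.length
instance (L : List Int) : Decidable (Pre_largest_three L) := by unfold Pre_largest_three; infer_instance
def pvWitness_largest_three : List Int := [5, 1, 4]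

def Spec_largest_three (L : List Int) (out : Int × Int × Int) : Prop := out = largest_three_alt L
instance (L : List Int) (out : Int × Int × Int) : Decidable (Spec_largest_three L out) := by unfold Spec_largest_three; infer_instance

-- ===== CLAIM (what is proved, stated in full; the proofs are below) =====
def Claim_equal_largest_three : Prop := ∀ (L : List Int), Dom_largest_three L → Pre_largest_three L → Spec_largest_three L (largest_three L)

-- ===== LEMMAS AND PROOFS =====

-- the scan returns an index of a maximal element among the indices not contained in A
theorem pvScan_spec (L A : List Int) (m0 : Int)
    (h0 : 0 ≤ m0) (h0n : m0 < (L.length : Int)) (h0A : ¬ A.contains m0) :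
    ∃ m : Nat, pvScan L A m0 = (m : Int) ∧ m < L.length ∧ ¬ A.contains ((m : Nat) : Int) ∧
      ∀ i : Nat, i < L.length → ¬ A.contains (i : Int) → L.getD i 0 ≤ L.getD m 0 := by
  have main : ∀ k, k ≤ L.length → ∃ m : Nat,
      (List.range k).foldl
        (fun (m : Int) (i : Nat) =>
          if PySem.List.pyGetD L (i : Int) 0 > PySem.List.pyGetD L m 0 ∧ ¬ A.contains (i : Int) then
            (i : Int)
          else m) m0 = (m : Int) ∧
      m < L.length ∧ ¬ A.contains ((m : Nat) : Int) ∧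
      ∀ i : Nat, i < k → ¬ A.contains (i : Int) → L.getD i 0 ≤ L.getD m 0 := by
    intro k
    induction k with
    | zero =>
      intro _
      refine ⟨m0.toNat, ?_, by omega, ?_, by omega⟩
      · simp [Int.toNat_of_nonneg h0]
      · rwa [Int.toNat_of_nonneg h0]
    | succ k ih =>
      intro hk
      obtain ⟨m, hm, hmlt, hmA, hmax⟩ := ih (by omega)
      rw [List.range_succ, List.foldl_append, hm]
      simp only [List.foldl_cons, List.foldl_nil]
      by_cases hc : PySem.List.pyGetD L (k : Int) 0 > PySem.List.pyGetD L ((m : Nat) : Int) 0 ∧ ¬ A.contains ((k : Nat) : Int)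
      · rw [if_pos hc]
        refine ⟨k, rfl, by omega, hc.2, ?_⟩
        intro i hi hiA
        have hck : L.getD m 0 < L.getD k 0 := by simpa using hc.1
        rcases Nat.lt_succ_iff_lt_or_eq.mp hi with hik | rfl
        · exact le_of_lt (lt_of_le_of_lt (hmax i hik hiA) hck)
        · exact le_refl _
      · rw [if_neg hc]
        refine ⟨m, rfl, hmlt, hmA, ?_⟩
        intro i hi hiA
        rcases Nat.lt_succ_iff_lt_or_eq.mp hi with hik | rfl
        · exact hmax i hik hiA
        · have h2 : ¬ (PySem.List.pyGetD L (i : Int) 0 > PySem.List.pyGetD L ((m : Nat) : Int) 0) :=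
            fun hgt => (not_and.mp hc hgt) hiA
          simpa using h2
  unfold pvScan
  exact main L.length le_rfl

-- removing one admissible index from the filtration of a duplicate-free index list
theorem filter_cons_perm (p : Nat → Bool) :
    ∀ (l : List Nat), l.Nodup → ∀ j ∈ l, p j = true →
      (l.filter p).Perm (j :: l.filter (fun i => p i && i != j)) := by
  intro l
  induction l with
  | nil => intro _ j hj; exact absurd hj (List.not_mem_nil)
  | cons a t ih =>
    intro hnd j hj hpj
    have hat : a ∉ t := (List.nodup_cons.mp hnd).1
    have hndt : t.Nodup := (List.nodup_cons.mp hnd).2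
    rcases List.mem_cons.mp hj with rfl | hjt
    · rw [List.filter_cons_of_pos hpj, List.filter_cons_of_neg (by simp)]
      have he : t.filter (fun i => p i && i != j) = t.filter p := by
        apply List.filter_congr
        intro i hi
        have : i ≠ j := fun h => hat (h ▸ hi)
        simp [this]
      rw [he]
    · by_cases hpa : p a = true
      · have haj : a ≠ j := fun h => hat (h ▸ hjt)
        rw [List.filter_cons_of_pos hpa, List.filter_cons_of_pos (by simp [hpa, haj])]
        exact ((ih hndt j hjt hpj).cons a).trans (List.Perm.swap _ _ _)
      · have hpa' : p a = false := by simpa using hpa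
        rw [List.filter_cons_of_neg (by simp [hpa']), List.filter_cons_of_neg (by simp [hpa'])]
        exact ih hndt j hjt hpj

-- a maximal element of a permutation of a sorted list is its last entry
theorem max_eq_getElem (s v : List Int) (hs : s.Pairwise (· ≤ ·)) (hp : v.Perm s)
    (x : Int) (hx : x ∈ v) (hmax : ∀ y ∈ v, y ≤ x) (k : Nat) (hk : s.length = k + 1) :
    x = s[k]'(by omega) := by
  have hxs : x ∈ s := hp.mem_iff.mp hx
  obtain ⟨i, hi, hix⟩ := List.mem_iff_getElem.mp hxs
  have hsk : s[k]'(by omega) ∈ v := hp.mem_iff.mpr (List.getElem_mem (by omega))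
  have h1 : s[k]'(by omega) ≤ x := hmax _ hsk
  have h2 : x ≤ s[k]'(by omega) := by
    rw [← hix]
    rcases Nat.lt_or_ge i k with hik | hik
    · exact List.pairwise_iff_getElem.mp hs i k (by omega) (by omega) hik
    · have : i = k := by omega
      subst this; exact le_refl _
  omega

-- the values of L sitting at the indices selected by q
def pvVals (L : List Int) (q : Nat → Bool) : List Int :=
  ((List.range L.length).filter q).map (fun i => L.getD i 0)

theorem pvVals_true (L : List Int) : pvVals L (fun _ => true) = L := by
  unfold pvVals
  rw [List.filter_true]
  apply List.ext_getElem (by simp)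
  intro i h1 h2
  simp [List.getD_eq_getElem?_getD, List.getElem?_eq_getElem h2]

-- one selection round: the maximum over the remaining indices is the top of the remaining
-- sorted prefix, and removing its index leaves a permutation of the next shorter prefix
theorem round_lemma (L s : List Int) (q : Nat → Bool) (k : Nat)
    (hperm : (pvVals L q).Perm (s.take (k + 1)))
    (hs : s.Pairwise (· ≤ ·)) (hk : k + 1 ≤ s.length)
    (m : Nat) (hm : m < L.length) (hqm : q m = true)
    (hmax : ∀ i : Nat, i < L.length → q i = true → L.getD i 0 ≤ L.getD m 0) :
    L.getD m 0 = s[k]'(by omega) ∧ (pvVals L (fun i => q i && i != m)).Perm (s.take k) := by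
  have hst : (s.take (k+1)).Pairwise (· ≤ ·) := hs.sublist (List.take_sublist _ _)
  have hlt : (s.take (k+1)).length = k + 1 := by simp; omega
  have hgetk : (s.take (k+1))[k]'(by omega) = s[k]'(by omega) := List.getElem_take
  have hxv : L.getD m 0 ∈ pvVals L q := by
    unfold pvVals
    exact List.mem_map_of_mem (List.mem_filter.mpr ⟨List.mem_range.mpr hm, hqm⟩)
  have hmaxv : ∀ y ∈ pvVals L q, y ≤ L.getD m 0 := by
    intro y hy
    obtain ⟨i, hi, rfl⟩ := List.mem_map.mp hy
    obtain ⟨hir, hqi⟩ := List.mem_filter.mp hi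
    exact hmax i (List.mem_range.mp hir) hqi
  have hval : L.getD m 0 = s[k]'(by omega) := by
    rw [← hgetk]
    exact max_eq_getElem _ _ hst hperm _ hxv hmaxv k hlt
  refine ⟨hval, ?_⟩
  have hpf : ((List.range L.length).filter q).Perm
      (m :: (List.range L.length).filter (fun i => q i && i != m)) :=
    filter_cons_perm q _ (List.nodup_range) m (List.mem_range.mpr hm) hqm
  have hmapped : (pvVals L q).Perm (L.getD m 0 :: pvVals L (fun i => q i && i != m)) := by
    unfold pvVals
    simpa using hpf.map (fun i => L.getD i 0)
  have htake : s.take (k+1) = s.take k ++ [s[k]'(by omega)] := by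
    rw [List.take_add_one]
    simp [List.getElem?_eq_getElem (by omega : k < s.length)]
  have h2 : (L.getD m 0 :: pvVals L (fun i => q i && i != m)).Perm
      (s.take k ++ [s[k]'(by omega)]) := by
    rw [← htake]; exact hmapped.symm.trans hperm
  have h3 : (L.getD m 0 :: pvVals L (fun i => q i && i != m)).Perm
      (s[k]'(by omega) :: s.take k) :=
    h2.trans (List.perm_append_singleton _ _)
  rw [hval] at h3
  exact h3.cons_inv

theorem notContains1 (x : Int) (i : Nat) :
    (¬ ([-1, -1, x] : List Int).contains (i : Int) = true) ↔ (i : Int) ≠ x := by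
  simp [List.contains_eq_mem]

theorem notContains2 (x y : Int) (i : Nat) :
    (¬ ([-1, y, x] : List Int).contains (i : Int) = true) ↔ ((i : Int) ≠ y ∧ (i : Int) ≠ x) := by
  simp [List.contains_eq_mem]

theorem pvFirstFree_spec1 (x : Int) :
    0 ≤ pvFirstFree [-1, -1, x] ∧ pvFirstFree [-1, -1, x] < 3 ∧
      ¬ ([-1, -1, x] : List Int).contains (pvFirstFree [-1, -1, x]) = true := by
  unfold pvFirstFree
  split_ifs with h1 h2 <;> simp_all [List.contains_eq_mem] <;> omega

theorem pvFirstFree_spec2 (x y : Int) :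
    0 ≤ pvFirstFree [-1, y, x] ∧ pvFirstFree [-1, y, x] < 3 ∧
      ¬ ([-1, y, x] : List Int).contains (pvFirstFree [-1, y, x]) = true := by
  unfold pvFirstFree
  split_ifs with h1 h2 <;> simp_all [List.contains_eq_mem]
  omega

-- ===== VERDICT (by name: the statement is the Claim_ definition above) =====
theorem largest_three_spec : Claim_equal_largest_three := by
  intro L _ hpre
  unfold Pre_largest_three at hpre
  obtain ⟨d, hd⟩ : ∃ d, L.length = d + 3 := ⟨L.length - 3, by omega⟩
  unfold Spec_largest_three
  simp only [largest_three, largest_three_alt]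
  set s := PySem.List.sorted L (fun x => x) false with hsdef
  have hsp : s.Perm L := PySem.List.sorted_perm L (fun x => x) false
  have hslen : s.length = L.length := hsp.length_eq
  have hs : s.Pairwise (· ≤ ·) := by
    simpa using PySem.List.sorted_pairwise L (fun x => x)
  -- round 1
  have hff0 : pvFirstFree [-1, -1, -1] = 0 := by decide
  obtain ⟨m1, hm1, hm1lt, hm1A, hm1max⟩ :=
    pvScan_spec L [-1, -1, -1] 0 (by omega) (by omega) (by decide)
  have hr1 := round_lemma L s (fun _ => true) (d + 2)
    (by rw [pvVals_true]
        have : s.take (d + 2 + 1) = s := by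
          rw [List.take_of_length_le (by omega)]
        rw [this]; exact hsp.symm)
    hs (by omega) m1 hm1lt rfl
    (by intro i hi _
        exact hm1max i hi (by simp [List.contains_eq_mem]))
  obtain ⟨hv1, hp2⟩ := hr1
  -- round 2
  obtain ⟨hff1a, hff1b, hff1c⟩ := pvFirstFree_spec1 (m1 : Int)
  obtain ⟨m2, hm2, hm2lt, hm2A, hm2max⟩ :=
    pvScan_spec L [-1, -1, (m1 : Int)] (pvFirstFree [-1, -1, (m1 : Int)]) hff1a (by omega) hff1c
  have hm2ne : m2 ≠ m1 := by
    have := (notContains1 (m1 : Int) m2).mp hm2A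
    exact fun h => this (by exact_mod_cast h)
  have hr2 := round_lemma L s (fun i => true && i != m1) (d + 1) hp2 hs (by omega)
    m2 hm2lt (by simp [hm2ne])
    (by intro i hi hq
        apply hm2max i hi
        rw [notContains1]
        have : i ≠ m1 := by simpa using hq
        exact fun h => this (by exact_mod_cast h))
  obtain ⟨hv2, hp3⟩ := hr2
  -- round 3
  obtain ⟨hff2a, hff2b, hff2c⟩ := pvFirstFree_spec2 (m1 : Int) (m2 : Int)
  obtain ⟨m3, hm3, hm3lt, hm3A, hm3max⟩ :=
    pvScan_spec L [-1, (m2 : Int), (m1 : Int)] (pvFirstFree [-1, (m2 : Int), (m1 : Int)]) hff2a (by omega) hff2c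
  have hm3ne : m3 ≠ m1 ∧ m3 ≠ m2 := by
    have := (notContains2 (m1 : Int) (m2 : Int) m3).mp hm3A
    exact ⟨fun h => this.2 (by exact_mod_cast h), fun h => this.1 (by exact_mod_cast h)⟩
  have hr3 := round_lemma L s (fun i => (true && i != m1) && i != m2) d hp3 hs (by omega)
    m3 hm3lt (by simp [hm3ne.1, hm3ne.2])
    (by intro i hi hq
        apply hm3max i hi
        rw [notContains2]
        have hq' : i ≠ m1 ∧ i ≠ m2 := by simpa using hq
        exact ⟨fun h => hq'.2 (by exact_mod_cast h), fun h => hq'.1 (by exact_mod_cast h)⟩)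
  obtain ⟨hv3, _⟩ := hr3
  -- evaluate A's folds
  have hrange : PySem.List.pyRange 2 (-1) (-1) = [2, 1, 0] := by decide
  have hr3l : List.range 3 = [0, 1, 2] := rfl
  rw [hrange, hr3l]
  simp only [List.foldl_cons, List.foldl_nil]
  have e1 : ([-1, -1, -1] : List Int).set (2 : Int).toNat
      (pvScan L [-1, -1, -1] (pvFirstFree [-1, -1, -1])) = [-1, -1, (m1 : Int)] := by
    rw [hff0, hm1]; rfl
  rw [e1]
  have e2 : ([-1, -1, (m1 : Int)] : List Int).set (1 : Int).toNat
      (pvScan L [-1, -1, (m1 : Int)] (pvFirstFree [-1, -1, (m1 : Int)])) = [-1, (m2 : Int), (m1 : Int)] := by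
    rw [hm2]; rfl
  rw [e2]
  have e3 : ([-1, (m2 : Int), (m1 : Int)] : List Int).set (0 : Int).toNat
      (pvScan L [-1, (m2 : Int), (m1 : Int)] (pvFirstFree [-1, (m2 : Int), (m1 : Int)])) = [(m3 : Int), (m2 : Int), (m1 : Int)] := by
    rw [hm3]; rfl
  rw [e3]
  -- evaluate the write-back loop and the negative indices on the B side
  have hneg3 : PySem.List.pyGetD s (-3) 0 = s[s.length - 3]'(by omega) :=
    PySem.List.pyGetD_neg_ofNat s 3 0 (by omega) (by omega)
  have hneg2 : PySem.List.pyGetD s (-2) 0 = s[s.length - 2]'(by omega) :=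
    PySem.List.pyGetD_neg_ofNat s 2 0 (by omega) (by omega)
  have hneg1 : PySem.List.pyGetD s (-1) 0 = s[s.length - 1]'(by omega) :=
    PySem.List.pyGetD_neg_ofNat s 1 0 (by omega) (by omega)
  have hidx3 : s.length - 3 = d := by omega
  have hidx2 : s.length - 2 = d + 1 := by omega
  have hidx1 : s.length - 1 = d + 2 := by omega
  rw [hneg3, hneg2, hneg1]
  simp only [hidx3, hidx2, hidx1]
  have gl1 : ∀ x y z : Int, PySem.List.pyGetD [x, y, z] 1 0 = y := by
    intro x y z; simp [PySem.List.pyGetD]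
  have gl2 : ∀ x y z : Int, PySem.List.pyGetD [x, y, z] 2 0 = z := by
    intro x y z; simp [PySem.List.pyGetD]
  simp [List.set, PySem.List.pyGetD_natCast, gl1, gl2]
  refine ⟨?_, ?_, ?_⟩ <;> rw [← List.getD_eq_getElem?_getD]
  · exact hv3
  · exact hv2
  · exact hv1
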